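-- pv_equiv track=rewrite | github.com/yeoswehon/InceptionV3_DeepFakes_Model | InceptionV3_DeepFake_Model_Experiments.py | get_frames_to_vid_mapping
-- ===== SOURCE A (Python) =====
-- def get_frames_to_vid_mapping(frame_list):
--
--   """
--   Helper function to generate a mapping of frames to it's corresponding video
--   name.
--
--   The path of frames in the frame_list will be in such format:
--   image/[video name]/[frame number].jpg
--   e.g. image/00000/00032.jpg
--
--   :param frame_list: A list of paths to the image frames
--   :return: A sorted dictionary with keys as the video name and value as the
--            corresponding frames.
--            e.g. of returned mapping dictionary:
--
--             {
--               "00000":[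
--                   "00032",
--                   "00064",
--                   .
--                   .
--                   .
--                   "00487"
--               ],
--               "00001":[
--                   "00000",
--                   "00032",
--                   .
--                   .
--                   .
--                   "00392"
--               ],
--               .
--               .
--               .
--               "00790":[
--                   "00000",
--                   "00027",
--                   .
--                   .
--                   .
--                   "00542"
--               ]
--             }
--   """
--
--   # Get all videos name
--   vidnames = [frame.split("/")[1:2][0] for frame in frame_list]
--   # Get only unique names
--   vidnames = set(vidnames)
--   # Init the mapping dict
--   mapping = {vidname: [] for vidname in vidnames}
--
--   # Add frames to to its corresponding list
--   for frame in frame_list: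
--     vidname = str(frame.split("/")[1:2][0])
--     frame_number = str(frame.split("/")[-1].split(".")[0])
--     mapping[vidname].append(frame_number)
--
--   return dict(sorted(mapping.items()))
-- ===== SOURCE B (Python) =====
-- def get_frames_to_vid_mapping(frame_list):
--   """Sort the frames stably by video name once, then group consecutive runs
--   of the same video in a single forward pass."""
--   vid = lambda f: f.split("/")[1]
--   groups = []
--   for f in sorted(frame_list, key=vid):
--     if groups and groups[-1][0] == vid(f):
--       groups[-1][1].append(f)
--     else:
--       groups.append((vid(f), [f]))
--   return {v: [f.split("/")[-1].split(".")[0] for f in frames]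
--           for v, frames in groups}
-- ===== Notes on version B (the rewrite author's own statement) =====
-- stated objective: alternative
-- what changed: Replaces A's multiple passes (name extraction, set dedup, dict pre-initialisation, dict populate, final sort of the items) by one stable sort of the frame list keyed on the video name followed by a single forward pass grouping consecutive runs; no set and no pre-initialised dict are used. Pre_ excludes only lists containing a frame without a '/', on which both programs raise IndexError.
import Mathlib
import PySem

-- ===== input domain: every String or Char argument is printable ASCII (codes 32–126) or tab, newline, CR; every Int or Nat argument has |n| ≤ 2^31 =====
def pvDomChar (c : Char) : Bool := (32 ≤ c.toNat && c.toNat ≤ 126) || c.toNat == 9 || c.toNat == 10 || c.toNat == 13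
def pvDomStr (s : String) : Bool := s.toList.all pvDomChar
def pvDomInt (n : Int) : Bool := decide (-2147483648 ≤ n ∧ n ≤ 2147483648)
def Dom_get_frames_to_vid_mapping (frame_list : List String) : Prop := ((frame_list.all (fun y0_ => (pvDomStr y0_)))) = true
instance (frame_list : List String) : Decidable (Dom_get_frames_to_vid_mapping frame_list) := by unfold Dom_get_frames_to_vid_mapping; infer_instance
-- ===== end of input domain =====

-- B replaces A's set-build + dict pre-init + populate + final item sort by one stable sort on the
-- video name followed by a single forward pass grouping consecutive runs (alternative).


-- shared helper: s.split(sep); exact here since both programs only split on "/" and "." (sep ≠ "", so split? is some)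
def pvSplit (s sep : String) : List String := (PySem.Str.split? s sep).getD [s]
-- shared helper: frame.split("/")[-1].split(".")[0] — the identical expression in both programs
-- (pyGetD is the total form of indexing: [-1] and [0] always exist since split is never empty)
def pvNum (f : String) : String :=
  PySem.List.pyGetD (pvSplit (PySem.List.pyGetD (pvSplit f "/") (-1) "") ".") 0 ""

-- ===== PORT A =====
-- frame.split("/")[1:2][0]; pyGetD total form — in range exactly under Pre_ (else Python raises IndexError)
def pvVidA (f : String) : String :=
  PySem.List.pyGetD (PySem.List.slice (pvSplit f "/") (some 1) (some 2)) 0 ""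

def get_frames_to_vid_mapping (frame_list : List String) : List (String × List String) :=
  let vidnames := frame_list.map (fun frame => pvVidA frame)
  let vidnamesSet : PySem.Set String := PySem.Set.ofList vidnames
  -- {vidname: [] for vidname in vidnames}: iterates the set; the final result is sorted by the
  -- (distinct) keys, so it does not depend on the set's iteration order
  let mapping : PySem.Dict String (List String) :=
    vidnamesSet.foldl (fun d v => d.insert v []) PySem.Dict.empty
  -- mapping[vidname].append(frame_number); the key is always present (it was pre-initialised),
  -- so modify's insert-if-absent branch is never taken and no KeyError is possible
  let mapping2 := frame_list.foldl
    (fun d frame => d.modify (pvVidA frame) [] (fun l => l ++ [pvNum frame])) mapping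
  -- dict(sorted(mapping.items())): the keys are distinct, so Python's tuple order is exactly order by the key
  PySem.List.sorted mapping2.items (fun p => p.1)

-- ===== PORT B =====
def pvVidB (f : String) : String := PySem.List.pyGetD (pvSplit f "/") 1 ""

-- loop body: append f to the last group if it has the same video name, else open a new group at the end
def pvGroupStep (groups : List (String × List String)) (f : String) : List (String × List String) :=
  match groups.getLast? with
  | some (v, g) =>
      if v = pvVidB f then groups.dropLast ++ [(v, g ++ [f])]
      else groups ++ [(pvVidB f, [f])]
  | none => [(pvVidB f, [f])]

def get_frames_to_vid_mapping_alt (frame_list : List String) : List (String × List String) :=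
  -- for f in sorted(frame_list, key=vid): append to the last group or start a new one
  let groups := (PySem.List.sorted frame_list (fun f => pvVidB f)).foldl pvGroupStep []
  -- the final dict comprehension: group keys are distinct, so the dict is exactly this list
  groups.map (fun p => (p.1, p.2.map (fun f => pvNum f)))

-- ===== PRECONDITION & SPEC =====
-- Pre_ excludes exactly the lists with a frame not containing "/": there A's frame.split("/")[1:2][0]
-- raises IndexError (and B's frame.split("/")[1] raises too).
def Pre_get_frames_to_vid_mapping (frame_list : List String) : Prop :=
  ∀ f ∈ frame_list, 2 ≤ ((PySem.Str.split? f "/").getD []).length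
instance (frame_list : List String) : Decidable (Pre_get_frames_to_vid_mapping frame_list) := by
  unfold Pre_get_frames_to_vid_mapping; infer_instance
def pvWitness_get_frames_to_vid_mapping : List String :=
  ["image/00000/00032.jpg", "image/00001/00000.jpg", "image/00000/00064.jpg"]
def Spec_get_frames_to_vid_mapping (frame_list : List String) (out : List (String × List String)) : Prop := out = get_frames_to_vid_mapping_alt frame_list
instance (frame_list : List String) (out : List (String × List String)) : Decidable (Spec_get_frames_to_vid_mapping frame_list out) := by unfold Spec_get_frames_to_vid_mapping; infer_instance

-- ===== CLAIM (what is proved, stated in full; the proofs are below) =====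
def Claim_equal_get_frames_to_vid_mapping : Prop := ∀ (frame_list : List String), Dom_get_frames_to_vid_mapping frame_list → Pre_get_frames_to_vid_mapping frame_list → Spec_get_frames_to_vid_mapping frame_list (get_frames_to_vid_mapping frame_list)

-- ===== LEMMAS AND PROOFS =====
-- Both ports are reduced to the same canonical form
--   (pvKs xs).map (fun k => (k, (pvGrp xs k).map pvNum)),
-- where pvKs xs is the sorted list of distinct video names and pvGrp xs k the frames of video k
-- in input order.

def pvGrp (xs : List String) (k : String) : List String := xs.filter (fun f => pvVidB f == k)
def pvFlat (xs ks : List String) : List String := ks.flatMap (pvGrp xs)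
def pvKs (xs : List String) : List String :=
  PySem.List.sorted (PySem.Set.ofList (xs.map pvVidB)) (fun k => k)

lemma pv_vid_eq (f : String) (h : 2 ≤ ((PySem.Str.split? f "/").getD []).length) :
    pvVidA f = pvVidB f := by
  unfold pvVidA pvVidB pvSplit
  cases hs : PySem.Str.split? f "/" with
  | none => rw [hs] at h; simp at h
  | some l =>
    rw [hs] at h
    simp only [Option.getD_some] at h ⊢
    match l, h with
    | a :: b :: rest, _ => simp [pysem]

lemma pv_insertBy_of_forall_before (before : String → String → Bool) (x : String)
    (l : List String) (h : ∀ y ∈ l, before x y = true) :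
    PySem.List.insertBy before x l = x :: l := by
  cases l with
  | nil => rfl
  | cons y ys => simp [PySem.List.insertBy, h y (by simp)]

lemma pv_insertBy_append_left (before : String → String → Bool) (x : String)
    (l1 l2 : List String) (h : ∀ y ∈ l1, before x y = false) :
    PySem.List.insertBy before x (l1 ++ l2) = l1 ++ PySem.List.insertBy before x l2 := by
  induction l1 with
  | nil => simp
  | cons y ys ih =>
    simp only [List.cons_append, PySem.List.insertBy, h y (by simp)]
    simp only [Bool.false_eq_true, if_false, List.cons.injEq, true_and]
    exact ih (fun z hz => h z (by simp [hz]))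

lemma pv_vid_of_mem_grp {f : String} {xs : List String} {k : String}
    (h : f ∈ pvGrp xs k) : pvVidB f = k := by
  simp [pvGrp, List.mem_filter] at h; exact h.2

lemma pvGrp_append_singleton (xs : List String) (x k : String) :
    pvGrp (xs ++ [x]) k = pvGrp xs k ++ (if pvVidB x = k then [x] else []) := by
  unfold pvGrp
  rw [List.filter_append]
  by_cases h : pvVidB x = k
  · simp [List.filter, h]
  · have hb : (pvVidB x == k) = false := by simp [h]
    simp [List.filter, hb, h]

lemma pvFlat_append_of_not_mem (xs : List String) (x : String) (t : List String)
    (h : pvVidB x ∉ t) : pvFlat (xs ++ [x]) t = pvFlat xs t := by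
  unfold pvFlat
  rw [List.flatMap_def, List.flatMap_def]
  congr 1
  apply List.map_congr_left
  intro k hk
  rw [pvGrp_append_singleton, if_neg (fun he => h (by rw [← he] at hk; exact hk))]
  simp

-- inserting x into the flat form: x goes to the end of its key's group (a new group if the key is new)
lemma pv_insert_flat (x : String) (ks xs : List String)
    (hks : ks.Pairwise (· < ·))
    (hne : ∀ k ∈ ks, pvGrp xs k ≠ [])
    (hout : pvVidB x ∉ ks → pvGrp xs (pvVidB x) = []) :
    PySem.List.insertBy (fun a b => decide (pvVidB a < pvVidB b)) x (pvFlat xs ks)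
      = pvFlat (xs ++ [x])
          (if pvVidB x ∈ ks then ks
           else PySem.List.insertBy (fun a b => decide (a < b)) (pvVidB x) ks) := by
  induction ks with
  | nil =>
    rw [if_neg (by simp)]
    have hL : PySem.List.insertBy (fun a b => decide (pvVidB a < pvVidB b)) x (pvFlat xs []) = [x] := rfl
    have hR : pvFlat (xs ++ [x]) (PySem.List.insertBy (fun a b => decide (a < b)) (pvVidB x) [])
        = pvGrp (xs ++ [x]) (pvVidB x) := by simp [pvFlat, PySem.List.insertBy]
    rw [hL, hR, pvGrp_append_singleton, hout (by simp), if_pos rfl]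
    simp
  | cons k t ih =>
    have htail : ∀ k' ∈ t, k < k' := fun k' hk' => (List.pairwise_cons.mp hks).1 k' hk'
    rcases lt_trichotomy (pvVidB x) k with hlt | heq | hgt
    · -- new smallest key
      have hnot : pvVidB x ∉ k :: t := by
        intro hmem
        rcases List.mem_cons.mp hmem with h | h
        · exact absurd (h ▸ hlt) (lt_irrefl _)
        · exact absurd (lt_trans hlt (htail _ h)) (lt_irrefl _)
      rw [if_neg hnot]
      rw [pv_insertBy_of_forall_before]
      · have h1 : PySem.List.insertBy (fun a b => decide (a < b)) (pvVidB x) (k :: t)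
            = pvVidB x :: k :: t := by
          simp [PySem.List.insertBy, hlt]
        rw [h1]
        have h2 : pvFlat (xs ++ [x]) (pvVidB x :: k :: t)
            = pvGrp (xs ++ [x]) (pvVidB x) ++ pvFlat (xs ++ [x]) (k :: t) := by
          simp [pvFlat]
        rw [h2, pvFlat_append_of_not_mem _ _ _ hnot,
          pvGrp_append_singleton, hout hnot, if_pos rfl]
        simp
      · intro y hy
        simp only [pvFlat, List.mem_flatMap] at hy
        obtain ⟨k', hk', hyg⟩ := hy
        have := pv_vid_of_mem_grp hyg
        rcases List.mem_cons.mp hk' with h | h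
        · simp [this, h, hlt]
        · simpa [this] using lt_trans hlt (htail _ h)
    · -- existing key: append to the end of its group
      rw [if_pos (by simp [heq])]
      have hsplit : pvFlat xs (k :: t) = pvGrp xs k ++ pvFlat xs t := by simp [pvFlat]
      rw [hsplit, pv_insertBy_append_left]
      · rw [pv_insertBy_of_forall_before]
        · have h2 : pvFlat (xs ++ [x]) (k :: t)
              = pvGrp (xs ++ [x]) k ++ pvFlat (xs ++ [x]) t := by simp [pvFlat]
          have hnt : pvVidB x ∉ t := by
            intro h; exact absurd (heq ▸ htail _ h) (lt_irrefl _)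
          rw [h2, pvFlat_append_of_not_mem _ _ _ hnt, pvGrp_append_singleton, if_pos heq]
          simp
        · intro y hy
          simp only [pvFlat, List.mem_flatMap] at hy
          obtain ⟨k', hk', hyg⟩ := hy
          have := pv_vid_of_mem_grp hyg
          simp [this, heq ▸ htail _ hk']
      · intro y hy
        have := pv_vid_of_mem_grp hy
        simp [this, heq]
    · -- key larger than the head: recurse into the tail
      have hne' : pvVidB x ≠ k := ne_of_gt hgt
      have ihh := ih (List.pairwise_cons.mp hks).2
        (fun k' hk' => hne k' (by simp [hk']))
        (fun hnt => hout (by simp [hne', hnt]))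
      have hsplit : pvFlat xs (k :: t) = pvGrp xs k ++ pvFlat xs t := by simp [pvFlat]
      rw [hsplit, pv_insertBy_append_left _ _ _ _
        (fun y hy => by simp [pv_vid_of_mem_grp hy, not_lt.mpr (le_of_lt hgt)]), ihh]
      by_cases hmem : pvVidB x ∈ t
      · rw [if_pos hmem, if_pos (by simp [hmem])]
        have h2 : pvFlat (xs ++ [x]) (k :: t)
            = pvGrp (xs ++ [x]) k ++ pvFlat (xs ++ [x]) t := by simp [pvFlat]
        rw [h2, pvGrp_append_singleton, if_neg hne']
        simp
      · rw [if_neg hmem, if_neg (by simp [hne', hmem])]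
        have h1 : PySem.List.insertBy (fun a b => decide (a < b)) (pvVidB x) (k :: t)
            = k :: PySem.List.insertBy (fun a b => decide (a < b)) (pvVidB x) t := by
          simp [PySem.List.insertBy, not_lt.mpr (le_of_lt hgt)]
        rw [h1]
        have h2 : pvFlat (xs ++ [x]) (k :: PySem.List.insertBy (fun a b => decide (a < b)) (pvVidB x) t)
            = pvGrp (xs ++ [x]) k ++ pvFlat (xs ++ [x]) (PySem.List.insertBy (fun a b => decide (a < b)) (pvVidB x) t) := by
          simp [pvFlat]
        rw [h2, pvGrp_append_singleton, if_neg hne']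
        simp

lemma pvKs_pairwise (xs : List String) : (pvKs xs).Pairwise (· < ·) :=
  PySem.List.sorted_ofList_pairwise_lt _

lemma pvKs_mem (xs : List String) (k : String) : k ∈ pvKs xs ↔ k ∈ xs.map pvVidB := by
  unfold pvKs
  rw [PySem.List.mem_sorted, PySem.Set.mem_ofList]

lemma pvKs_grp_ne (xs : List String) (k : String) (h : k ∈ pvKs xs) : pvGrp xs k ≠ [] := by
  rw [pvKs_mem] at h
  obtain ⟨f, hf, hfk⟩ := List.mem_map.mp h
  intro hnil
  have : f ∈ pvGrp xs k := by simp [pvGrp, List.mem_filter, hf, hfk]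
  simp [hnil] at this

lemma pvKs_grp_out (xs : List String) (k : String) (h : k ∉ pvKs xs) : pvGrp xs k = [] := by
  rw [pvKs_mem] at h
  unfold pvGrp
  rw [List.filter_eq_nil_iff]
  intro f hf
  simp only [beq_iff_eq]
  intro he
  exact h (List.mem_map.mpr ⟨f, hf, he⟩)

lemma pv_sorted_append_singleton {α κ : Type} [LinearOrder κ] (xs : List α) (x : α) (key : α → κ) :
    PySem.List.sorted (xs ++ [x]) key =
      PySem.List.insertBy (fun a b => decide (key a < key b)) x (PySem.List.sorted xs key) := by
  rw [PySem.List.sorted_eq_foldl_insertBy, PySem.List.sorted_eq_foldl_insertBy, List.foldl_append]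
  rfl

lemma pvKs_append_singleton (xs : List String) (x : String) :
    pvKs (xs ++ [x]) = if pvVidB x ∈ pvKs xs then pvKs xs
      else PySem.List.insertBy (fun a b => decide (a < b)) (pvVidB x) (pvKs xs) := by
  by_cases h : pvVidB x ∈ pvKs xs
  · rw [if_pos h]
    have hm : pvVidB x ∈ PySem.Set.ofList (xs.map pvVidB) := by
      rw [← PySem.List.mem_sorted (key := fun k => k) (rev := false)]; exact h
    unfold pvKs
    rw [List.map_append, List.map_singleton, PySem.Set.ofList_append_singleton,
      PySem.Set.add_of_mem hm]
  · rw [if_neg h]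
    have hm : pvVidB x ∉ PySem.Set.ofList (xs.map pvVidB) := by
      rw [← PySem.List.mem_sorted (key := fun k => k) (rev := false)]; exact h
    unfold pvKs
    rw [List.map_append, List.map_singleton, PySem.Set.ofList_append_singleton,
      PySem.Set.add_of_not_mem hm]
    exact pv_sorted_append_singleton _ _ _

-- stable sort by video name = the groups of the distinct names in sorted-name order, each in input order
lemma pv_sorted_decomp (xs : List String) :
    PySem.List.sorted xs (fun f => pvVidB f) = pvFlat xs (pvKs xs) := by
  induction xs using List.reverseRecOn with
  | nil => rfl
  | append_singleton xs x ih =>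
    rw [pv_sorted_append_singleton, ih, pvKs_append_singleton,
      pv_insert_flat x (pvKs xs) xs (pvKs_pairwise xs) (pvKs_grp_ne xs) (pvKs_grp_out xs (pvVidB x))]

-- the forward loop consumes a run of frames of the current last group's key, extending that group
lemma pv_gb_run (acc : List (String × List String)) (k : String) (g1 g2 : List String)
    (hk : ∀ f ∈ g2, pvVidB f = k) :
    g2.foldl pvGroupStep (acc ++ [(k, g1)]) = acc ++ [(k, g1 ++ g2)] := by
  induction g2 generalizing g1 with
  | nil => simp
  | cons f fs ih =>
    rw [List.foldl_cons]
    have hstep : pvGroupStep (acc ++ [(k, g1)]) f = acc ++ [(k, g1 ++ [f])] := by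
      unfold pvGroupStep
      rw [List.getLast?_concat]
      simp [hk f (by simp)]
    rw [hstep, ih (g1 ++ [f]) (fun f' hf' => hk f' (by simp [hf']))]
    simp

-- B's grouping loop on a list of consecutive runs produces exactly one pair per run
lemma pv_gb_flat (ks xs : List String) (acc : List (String × List String))
    (hks : ks.Pairwise (· < ·))
    (hne : ∀ k ∈ ks, pvGrp xs k ≠ [])
    (hacc : ∀ k ∈ ks, acc.getLast?.map Prod.fst ≠ some k) :
    (pvFlat xs ks).foldl pvGroupStep acc = acc ++ ks.map (fun k => (k, pvGrp xs k)) := by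
  induction ks generalizing acc with
  | nil => simp [pvFlat]
  | cons k t ih =>
    have hsplit : pvFlat xs (k :: t) = pvGrp xs k ++ pvFlat xs t := by simp [pvFlat]
    obtain ⟨f0, grest, hgr⟩ : ∃ f0 grest, pvGrp xs k = f0 :: grest := by
      cases hg : pvGrp xs k with
      | nil => exact absurd hg (hne k (by simp))
      | cons a b => exact ⟨a, b, rfl⟩
    have hv0 : pvVidB f0 = k := pv_vid_of_mem_grp (by rw [hgr]; simp)
    have hstep0 : pvGroupStep acc f0 = acc ++ [(k, [f0])] := by
      unfold pvGroupStep
      cases hl : acc.getLast? with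
      | none =>
        have : acc = [] := List.getLast?_eq_none_iff.mp hl
        simp [this, hv0]
      | some p =>
        obtain ⟨v0, g0⟩ := p
        have hne0 : v0 ≠ pvVidB f0 := by
          rw [hv0]
          intro he
          exact hacc k (by simp) (by rw [hl, he]; rfl)
        show (if v0 = pvVidB f0 then acc.dropLast ++ [(v0, g0 ++ [f0])]
              else acc ++ [(pvVidB f0, [f0])]) = acc ++ [(k, [f0])]
        rw [if_neg hne0, hv0]
    rw [hsplit, List.foldl_append, hgr, List.foldl_cons, hstep0,
      pv_gb_run acc k [f0] grest (fun f hf => pv_vid_of_mem_grp (by rw [hgr]; simp [hf]))]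
    have hacc' : ∀ k' ∈ t, (acc ++ [(k, [f0] ++ grest)]).getLast?.map Prod.fst ≠ some k' := by
      intro k' hk'
      rw [List.getLast?_concat]
      simp only [Option.map_some, ne_eq, Option.some.injEq]
      exact ne_of_lt ((List.pairwise_cons.mp hks).1 k' hk')
    rw [ih (acc ++ [(k, [f0] ++ grest)]) (List.pairwise_cons.mp hks).2
      (fun k' hk' => hne k' (by simp [hk'])) hacc']
    simp [hgr]

-- A's populate loop, on a dict whose keys already cover every frame's video name
lemma pv_items_modify_loop (l : List String) (kf nf : String → String)
    (d : PySem.Dict String (List String)) (hnod : d.keys.Nodup)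
    (hin : ∀ f ∈ l, d.contains (kf f) = true) :
    (l.foldl (fun d f => d.modify (kf f) [] (fun g => g ++ [nf f])) d).items
      = d.items.map (fun p => (p.1, p.2 ++ (l.filter (fun f => kf f == p.1)).map nf)) := by
  induction l generalizing d with
  | nil => simp
  | cons f l ih =>
    rw [List.foldl_cons]
    set d' := d.modify (kf f) [] (fun g => g ++ [nf f]) with hd'
    have hitems' : d'.items = d.items.map
        (fun p => (p.1, p.2 ++ if kf f == p.1 then [nf f] else [])) := by
      rw [hd']
      show (d.insert (kf f) ((d.getD (kf f) []) ++ [nf f])).items = _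
      rw [PySem.Dict.items_insert_of_contains d _ (hin f (by simp))]
      apply List.map_congr_left
      intro p hp
      obtain ⟨p1, p2⟩ := p
      by_cases h : p1 = kf f
      · have hb2 : (kf f == p1) = true := by simp [h]
        have hget : d.getD (kf f) [] = p2 :=
          PySem.Dict.getD_of_mem_items d (by rw [← h]; exact hp) hnod []
        simp [hget, h]
      · have hb : (p1 == kf f) = false := by rw [beq_eq_false_iff_ne]; exact h
        have hb2 : (kf f == p1) = false := by
          rw [beq_eq_false_iff_ne]; exact fun he => h he.symm
        simp [hb, hb2]
    have hkeys' : d'.keys = d.keys := by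
      rw [hd']
      show (d.insert (kf f) _).keys = d.keys
      exact PySem.Dict.keys_insert_of_contains d _ (hin f (by simp))
    have hnod' : d'.keys.Nodup := by rw [hkeys']; exact hnod
    have hin' : ∀ f' ∈ l, d'.contains (kf f') = true := by
      intro f' hf'
      rw [PySem.Dict.contains_iff_mem_keys, hkeys', ← PySem.Dict.contains_iff_mem_keys]
      exact hin f' (by simp [hf'])
    rw [ih d' hnod' hin', hitems', List.map_map]
    apply List.map_congr_left
    intro p hp
    simp only [Function.comp]
    by_cases h : kf f = p.1
    · have hb : (kf f == p.1) = true := by simp [h]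
      simp [hb]
    · have hb : (kf f == p.1) = false := by simp [h]
      simp [hb]

lemma pv_portB_canon (frame_list : List String) :
    get_frames_to_vid_mapping_alt frame_list
      = (pvKs frame_list).map (fun k => (k, (pvGrp frame_list k).map pvNum)) := by
  unfold get_frames_to_vid_mapping_alt
  rw [pv_sorted_decomp, pv_gb_flat _ _ [] (pvKs_pairwise frame_list)
    (fun k hk => pvKs_grp_ne _ _ hk) (by simp), List.nil_append, List.map_map]
  rfl

lemma pv_portA_canon (frame_list : List String)
    (hp : Pre_get_frames_to_vid_mapping frame_list) :
    get_frames_to_vid_mapping frame_list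
      = (pvKs frame_list).map (fun k => (k, (pvGrp frame_list k).map pvNum)) := by
  unfold get_frames_to_vid_mapping
  simp only []
  have hmapeq : frame_list.map (fun frame => pvVidA frame) = frame_list.map pvVidB :=
    List.map_congr_left (fun f hf => pv_vid_eq f (hp f hf))
  rw [hmapeq]
  set S := PySem.Set.ofList (frame_list.map pvVidB) with hS
  have hinit : ((S : List String).foldl (fun d v => d.insert v []) PySem.Dict.empty).items
      = S.map (fun k => (k, ([] : List String))) := by
    rw [PySem.Dict.items_foldl_insert_fresh S (fun a => a) (fun _ => []) PySem.Dict.empty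
      (fun a _ => PySem.Dict.contains_empty a)
      (by rw [show List.map (fun a => a) (S : List String) = S from List.map_id' S, hS]
          exact PySem.Set.nodup_ofList _)]
    rfl
  set d0 := (S : List String).foldl (fun d v => d.insert v []) PySem.Dict.empty with hd0
  have hkeys0 : d0.keys = S := by
    show d0.items.map Prod.fst = S
    rw [hinit, List.map_map]
    show List.map (fun k => k) (S : List String) = S
    exact List.map_id' S
  have hnod0 : d0.keys.Nodup := by rw [hkeys0]; exact PySem.Set.nodup_ofList _
  have hloopeq : frame_list.foldl
      (fun d frame => d.modify (pvVidA frame) [] (fun l => l ++ [pvNum frame])) d0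
      = frame_list.foldl
      (fun d frame => d.modify (pvVidB frame) [] (fun l => l ++ [pvNum frame])) d0 :=
    PySem.List.foldl_congr_mem _ _ _ _
      (fun acc x hx => by rw [pv_vid_eq x (hp x hx)])
  rw [hloopeq]
  have hin : ∀ f ∈ frame_list, d0.contains (pvVidB f) = true := by
    intro f hf
    rw [PySem.Dict.contains_iff_mem_keys, hkeys0, hS, PySem.Set.mem_ofList]
    exact List.mem_map.mpr ⟨f, hf, rfl⟩
  rw [pv_items_modify_loop frame_list pvVidB pvNum d0 hnod0 hin, hinit, List.map_map]
  have hitems : (S.map ((fun p => (p.1, p.2 ++ (frame_list.filter (fun f => pvVidB f == p.1)).map pvNum)) ∘ (fun k => (k, ([] : List String)))))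
      = S.map (fun k => (k, (pvGrp frame_list k).map pvNum)) := by
    apply List.map_congr_left
    intro k _
    simp [pvGrp]
  rw [hitems]
  apply PySem.List.sorted_eq_of_perm_of_pairwise_lt
  · exact List.Perm.map _ (PySem.List.sorted_perm (S : List String) (fun k => k) false)
  · have := pvKs_pairwise frame_list
    exact List.pairwise_map.mpr (by simpa using this)

-- ===== VERDICT (by name: the statement is the Claim_ definition above) =====
theorem get_frames_to_vid_mapping_spec : Claim_equal_get_frames_to_vid_mapping := by
  intro frame_list _hd hp
  unfold Spec_get_frames_to_vid_mapping
  rw [pv_portA_canon frame_list hp, pv_portB_canon frame_list]
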